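-- pv_equiv track=rewrite | github.com/TCDev69/CitySimulator | mainFlet.py | all_roads_connected
-- ===== SOURCE A (Python) =====
-- def all_roads_connected(grid):
--     # Trova tutte le posizioni delle strade
--     road_positions = [(r, c) for r, row in enumerate(grid) for c, cell in enumerate(row) if cell == 1]
--     if not road_positions:
--         return True  # Nessuna strada, consideriamo valido
--
--     # BFS per trovare tutte le strade collegate partendo dalla prima
--     visited = set()
--     queue = [road_positions[0]]
--     while queue:
--         r, c = queue.pop(0)
--         if (r, c) in visited:
--             continue
--         visited.add((r, c))
--         for dr, dc in [(-1,0),(1,0),(0,-1),(0,1)]: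
--             nr, nc = r + dr, c + dc
--             if 0 <= nr < len(grid) and 0 <= nc < len(grid[0]):
--                 if grid[nr][nc] == 1 and (nr, nc) not in visited:
--                     queue.append((nr, nc))
--     # Se tutte le strade sono state visitate, sono collegate
--     return len(visited) == len(road_positions)
-- ===== SOURCE B (Python) =====
-- def all_roads_connected(grid):
--     # Saturation (fixed-point) approach: no BFS queue/visited bookkeeping.
--     roads = [(r, c) for r, row in enumerate(grid) for c, cell in enumerate(row) if cell == 1]
--     if not roads:
--         return True
--     comp = {roads[0]}
--     for _ in range(len(roads)):
--         comp = comp | {(r, c) for (r, c) in roads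
--                        if (r - 1, c) in comp or (r + 1, c) in comp
--                        or (r, c - 1) in comp or (r, c + 1) in comp}
--     return all(p in comp for p in roads)
-- ===== Notes on version B (the rewrite author's own statement) =====
-- stated objective: alternative
-- what changed: Replaces the BFS with its queue/visited bookkeeping by a fixed-point saturation: the component set is grown by repeatedly absorbing every road cell adjacent to it (len(roads) rounds), then the function checks that every road was absorbed.
-- outside the precondition, e.g. on all_roads_connected([[1], [1, 1]]): A returns False, B returns True; on all_roads_connected([[1, 1], [1]]): A raises IndexError, B returns True
import Mathlib
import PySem

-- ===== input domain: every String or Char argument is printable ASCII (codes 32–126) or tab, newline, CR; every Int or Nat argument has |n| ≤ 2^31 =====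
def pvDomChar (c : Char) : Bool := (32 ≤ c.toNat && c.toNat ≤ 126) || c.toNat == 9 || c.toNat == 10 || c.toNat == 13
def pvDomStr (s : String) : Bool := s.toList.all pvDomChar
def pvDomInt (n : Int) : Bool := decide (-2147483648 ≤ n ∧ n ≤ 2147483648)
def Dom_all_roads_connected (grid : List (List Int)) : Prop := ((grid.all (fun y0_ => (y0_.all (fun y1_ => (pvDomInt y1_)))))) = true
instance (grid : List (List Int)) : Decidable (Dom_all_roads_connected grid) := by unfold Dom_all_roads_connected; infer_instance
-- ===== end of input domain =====

-- B replaces A's BFS (queue + visited set) by a fixed-point saturation of the road component;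
-- same result on rectangular grids (objective: alternative decomposition, not faster).


-- ===== PORT A =====
-- [(r, c) for r, row in enumerate(grid) for c, cell in enumerate(row) if cell == 1]
def pvRoads (grid : List (List Int)) : List (Int × Int) :=
  (PySem.List.enumerate grid).flatMap (fun rrow =>
    (PySem.List.enumerate rrow.2).filterMap (fun ccell =>
      if ccell.2 = 1 then some (rrow.1, ccell.1) else none))

-- grid[r][c]; inputs where Python raises IndexError lie outside Pre_ (the getD 0 is never reached there)
def pvCell (grid : List (List Int)) (r c : Int) : Int :=
  (PySem.List.pyGet? ((PySem.List.pyGet? grid r).getD []) c).getD 0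

-- the 'while queue:' loop; fuel only guards totality (proved sufficient under Pre_)
def pvBfs (grid : List (List Int)) :
    Nat → PySem.Set (Int × Int) → List (Int × Int) → PySem.Set (Int × Int)
  | _, visited, [] => visited
  | 0, visited, _ :: _ => visited
  | fuel + 1, visited, p :: queue =>
    if p ∈ visited then pvBfs grid fuel visited queue
    else
      pvBfs grid fuel (PySem.Set.add visited p)
        (queue ++ ([((-1 : Int), (0 : Int)), (1, 0), (0, -1), (0, 1)].filterMap (fun d =>
          if 0 ≤ p.1 + d.1 ∧ p.1 + d.1 < (grid.length : Int) ∧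
             0 ≤ p.2 + d.2 ∧ p.2 + d.2 < ((grid.headD []).length : Int) ∧
             pvCell grid (p.1 + d.1) (p.2 + d.2) = 1 ∧ (p.1 + d.1, p.2 + d.2) ∉ visited
          then some (p.1 + d.1, p.2 + d.2) else none)))

def all_roads_connected (grid : List (List Int)) : Bool :=
  let road_positions := pvRoads grid
  match road_positions with
  | [] => true
  | s :: _ =>
    let visited := pvBfs grid (1 + 4 * road_positions.length) PySem.Set.empty [s]
    visited.length == road_positions.length

-- ===== PORT B =====
-- comp | {(r, c) for (r, c) in roads if a 4-neighbour of (r, c) is in comp}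
def pvStep (roads : List (Int × Int)) (comp : PySem.Set (Int × Int)) : PySem.Set (Int × Int) :=
  PySem.Set.union comp (roads.filter (fun p =>
    decide ((p.1 - 1, p.2) ∈ comp) || decide ((p.1 + 1, p.2) ∈ comp) ||
    decide ((p.1, p.2 - 1) ∈ comp) || decide ((p.1, p.2 + 1) ∈ comp)))

def all_roads_connected_alt (grid : List (List Int)) : Bool :=
  let roads := pvRoads grid
  match roads with
  | [] => true
  | s :: _ =>
    let comp := (PySem.List.pyRange 0 roads.length 1).foldl
      (fun comp _ => pvStep roads comp) (PySem.Set.ofList [s])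
    roads.all (fun p => PySem.Set.contains comp p)

-- ===== PRECONDITION & SPEC =====
-- Pre_ restricts to the natural domain: rectangular grids (or grids with no road cell at all,
-- on which A returns True regardless of shape). It excludes non-rectangular grids containing a 1,
-- on which A may raise IndexError or apply the accidental column bound len(grid[0]).
def Pre_all_roads_connected (grid : List (List Int)) : Prop :=
  (∀ row ∈ grid, row.length = (grid.headD []).length) ∨ (∀ row ∈ grid, ∀ c ∈ row, c ≠ 1)
instance (grid : List (List Int)) : Decidable (Pre_all_roads_connected grid) := by
  unfold Pre_all_roads_connected; infer_instance

def pvWitness_all_roads_connected : List (List Int) := [[1, 0], [1, 1]]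

def Spec_all_roads_connected (grid : List (List Int)) (out : Bool) : Prop := out = all_roads_connected_alt grid
instance (grid : List (List Int)) (out : Bool) : Decidable (Spec_all_roads_connected grid out) := by unfold Spec_all_roads_connected; infer_instance

-- ===== CLAIM (what is proved, stated in full; the proofs are below) =====
def Claim_equal_all_roads_connected : Prop := ∀ (grid : List (List Int)), Dom_all_roads_connected grid → Pre_all_roads_connected grid → Spec_all_roads_connected grid (all_roads_connected grid)

-- ===== LEMMAS AND PROOFS =====

lemma mem_pvRoads (grid : List (List Int)) (p : Int × Int) :
    p ∈ pvRoads grid ↔ ∃ (k : Nat) (_ : k < grid.length) (j : Nat) (_ : j < grid[k].length),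
      p = ((k : Int), (j : Int)) ∧ grid[k][j] = 1 := by
  constructor
  · intro h
    simp only [pvRoads, List.mem_flatMap] at h
    obtain ⟨rrow, hr, hp⟩ := h
    rw [PySem.List.mem_enumerate_iff] at hr
    obtain ⟨k, hk, rfl⟩ := hr
    simp only [List.mem_filterMap] at hp
    obtain ⟨ccell, hc, hif⟩ := hp
    rw [PySem.List.mem_enumerate_iff] at hc
    obtain ⟨j, hj, rfl⟩ := hc
    split at hif
    · rename_i h1
      exact ⟨k, hk, j, hj, by simpa using hif.symm, by simpa using h1⟩
    · exact absurd hif (by simp)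
  · rintro ⟨k, hk, j, hj, rfl, h1⟩
    simp only [pvRoads, List.mem_flatMap]
    refine ⟨((k : Int), grid[k]), ?_, ?_⟩
    · rw [PySem.List.mem_enumerate_iff]
      exact ⟨k, hk, by simp⟩
    · simp only [List.mem_filterMap]
      refine ⟨((j : Int), grid[k][j]), ?_, by simp [h1]⟩
      rw [PySem.List.mem_enumerate_iff]
      exact ⟨j, hj, by simp⟩

lemma nodup_pvRoads (grid : List (List Int)) : (pvRoads grid).Nodup := by
  rw [pvRoads, List.nodup_flatMap]
  constructor
  · intro rrow _
    apply List.Nodup.filterMap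
    · rintro ⟨c, cell⟩ ⟨c', cell'⟩ b hb hb'
      simp only [Option.mem_def] at hb hb'
      by_cases h1 : cell = 1 <;> by_cases h2 : cell' = 1 <;> simp [h1, h2] at hb hb'
      rw [← hb'] at hb
      simp_all [Prod.ext_iff]
    · have hp := PySem.List.pairwise_lt_enumerate rrow.2 0
      have hne : (PySem.List.enumerate rrow.2 0).Pairwise (· ≠ ·) := by
        refine List.Pairwise.imp ?_ hp
        intro a b hlt heq
        rw [heq] at hlt; exact lt_irrefl _ hlt
      exact hne
  · have hp := PySem.List.pairwise_lt_enumerate grid 0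
    refine hp.imp ?_
    intro a b hab x hxa hxb
    simp only [Function.onFun, List.mem_filterMap, Option.mem_def] at hxa hxb
    obtain ⟨ca, _, hca⟩ := hxa
    obtain ⟨cb, _, hcb⟩ := hxb
    by_cases h1 : ca.2 = 1 <;> simp [h1] at hca
    by_cases h2 : cb.2 = 1 <;> simp [h2] at hcb
    rw [← hcb] at hca
    have := congrArg Prod.fst hca
    simp at this
    omega

lemma pvCell_natCast (grid : List (List Int)) (k j : Nat) (hk : k < grid.length)
    (hj : j < grid[k].length) : pvCell grid (k : Int) (j : Int) = grid[k][j] := by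
  simp [pvCell, PySem.List.pyGet?_natCast, List.getElem?_eq_getElem hk,
    List.getElem?_eq_getElem hj]

lemma adm_iff_mem (grid : List (List Int))
    (hrect : ∀ row ∈ grid, row.length = (grid.headD []).length) (p : Int × Int) :
    (0 ≤ p.1 ∧ p.1 < (grid.length : Int) ∧ 0 ≤ p.2 ∧ p.2 < ((grid.headD []).length : Int) ∧
      pvCell grid p.1 p.2 = 1) ↔ p ∈ pvRoads grid := by
  rw [mem_pvRoads]
  constructor
  · rintro ⟨h1, h2, h3, h4, h5⟩
    refine ⟨p.1.toNat, by omega, p.2.toNat, ?_, ?_, ?_⟩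
    · have := hrect (grid[p.1.toNat]'(by omega)) (List.getElem_mem _)
      omega
    · obtain ⟨a, b⟩ := p
      simp only [Prod.mk.injEq]
      omega
    · rw [← pvCell_natCast grid p.1.toNat p.2.toNat]
      rw [Int.toNat_of_nonneg h1, Int.toNat_of_nonneg h3]
      exact h5
  · rintro ⟨k, hk, j, hj, rfl, h1⟩
    have hr := hrect grid[k] (List.getElem_mem _)
    refine ⟨by simp, by show (k:Int) < _; exact_mod_cast hk, by simp, by show (j:Int) < _; exact_mod_cast (hr ▸ hj), ?_⟩
    rw [pvCell_natCast grid k j hk hj]; exact h1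

def pvAdj (p q : Int × Int) : Prop :=
  q = (p.1 - 1, p.2) ∨ q = (p.1 + 1, p.2) ∨ q = (p.1, p.2 - 1) ∨ q = (p.1, p.2 + 1)

def pvReach (R : List (Int × Int)) (s : Int × Int) : Int × Int → Prop :=
  Relation.ReflTransGen (fun p q => q ∈ R ∧ pvAdj p q) s

lemma mem_pvNew (grid : List (List Int))
    (hrect : ∀ row ∈ grid, row.length = (grid.headD []).length)
    (visited : List (Int × Int)) (p q : Int × Int) :
    q ∈ ([((-1 : Int), (0 : Int)), (1, 0), (0, -1), (0, 1)].filterMap (fun d =>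
          if 0 ≤ p.1 + d.1 ∧ p.1 + d.1 < (grid.length : Int) ∧
             0 ≤ p.2 + d.2 ∧ p.2 + d.2 < ((grid.headD []).length : Int) ∧
             pvCell grid (p.1 + d.1) (p.2 + d.2) = 1 ∧ (p.1 + d.1, p.2 + d.2) ∉ visited
          then some (p.1 + d.1, p.2 + d.2) else none))
      ↔ pvAdj p q ∧ q ∈ pvRoads grid ∧ q ∉ visited := by
  constructor
  · intro h
    simp only [List.mem_filterMap, List.mem_cons, List.mem_singleton] at h
    obtain ⟨d, hd, hf⟩ := h
    split at hf
    · rename_i hc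
      obtain ⟨h1, h2, h3, h4, h5, h6⟩ := hc
      cases hf
      refine ⟨?_, (adm_iff_mem grid hrect _).mp ⟨h1, h2, h3, h4, h5⟩, h6⟩
      rcases hd with rfl | rfl | rfl | rfl | h
      · left; simp [Prod.ext_iff] <;> omega
      · right; left; simp [Prod.ext_iff] <;> omega
      · right; right; left; simp [Prod.ext_iff] <;> omega
      · right; right; right; simp [Prod.ext_iff] <;> omega
      · simp at h
    · simp at hf
  · rintro ⟨hadj, hR, hv⟩
    have hadm := (adm_iff_mem grid hrect q).mpr hR
    simp only [List.mem_filterMap, List.mem_cons, List.mem_singleton]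
    rcases hadj with rfl | rfl | rfl | rfl
    · refine ⟨(-1, 0), by simp, ?_⟩
      rw [if_pos]
      · simp [Prod.ext_iff] <;> omega
      · simp only [] at hadm ⊢
        exact ⟨by omega, by omega, by omega, by omega,
          by rw [show p.1 + -1 = p.1 - 1 by ring, show p.2 + 0 = p.2 by ring]; exact hadm.2.2.2.2,
          by simpa using hv⟩
    · refine ⟨(1, 0), by simp, ?_⟩
      rw [if_pos]
      · simp [Prod.ext_iff] <;> omega
      · exact ⟨by omega, by omega, by omega, by omega,
          by rw [show p.2 + 0 = p.2 by ring]; exact hadm.2.2.2.2,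
          by simpa using hv⟩
    · refine ⟨(0, -1), by simp, ?_⟩
      rw [if_pos]
      · simp [Prod.ext_iff] <;> omega
      · exact ⟨by omega, by omega, by omega, by omega,
          by rw [show p.1 + 0 = p.1 by ring, show p.2 + -1 = p.2 - 1 by ring]; exact hadm.2.2.2.2,
          by simpa using hv⟩
    · refine ⟨(0, 1), by simp, ?_⟩
      rw [if_pos]
      · simp [Prod.ext_iff] <;> omega
      · exact ⟨by omega, by omega, by omega, by omega,
          by rw [show p.1 + 0 = p.1 by ring]; exact hadm.2.2.2.2,
          by simpa using hv⟩

lemma pvBfs_spec (grid : List (List Int))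
    (hrect : ∀ row ∈ grid, row.length = (grid.headD []).length)
    (s : Int × Int) (hs : s ∈ pvRoads grid) :
    ∀ (fuel : Nat) (visited : PySem.Set (Int × Int)) (queue : List (Int × Int)),
    visited.Nodup →
    (∀ x ∈ visited, x ∈ pvRoads grid) → (∀ x ∈ queue, x ∈ pvRoads grid) →
    (∀ x ∈ visited, pvReach (pvRoads grid) s x) → (∀ x ∈ queue, pvReach (pvRoads grid) s x) →
    (s ∈ visited ∨ s ∈ queue) →
    (∀ x ∈ visited, ∀ q, q ∈ pvRoads grid → pvAdj x q → q ∈ visited ∨ q ∈ queue) →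
    (queue.length + 4 * ((pvRoads grid).filter (fun x => decide (x ∉ visited))).length ≤ fuel) →
    ((pvBfs grid fuel visited queue).Nodup ∧
     (∀ x ∈ pvBfs grid fuel visited queue, x ∈ pvRoads grid) ∧
     (∀ x, x ∈ pvBfs grid fuel visited queue ↔ pvReach (pvRoads grid) s x)) := by
  intro fuel
  induction fuel with
  | zero =>
    intro visited queue hnd hvr hqr hvs hqs hst hcl hfuel
    have hq : queue = [] := by
      cases queue with
      | nil => rfl
      | cons a l => simp at hfuel
    subst hq
    refine ⟨hnd, hvr, fun x => ⟨fun hx => hvs x hx, fun hx => ?_⟩⟩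
    · induction hx with
      | refl => exact hst.resolve_right (by simp)
      | tail h1 h2 ih => exact ((hcl _ ih _ h2.1 h2.2).resolve_right (by simp))
  | succ f IH =>
    intro visited queue hnd hvr hqr hvs hqs hst hcl hfuel
    cases queue with
    | nil =>
      refine ⟨hnd, hvr, fun x => ⟨fun hx => hvs x hx, fun hx => ?_⟩⟩
      · induction hx with
        | refl => exact hst.resolve_right (by simp)
        | tail h1 h2 ih => exact ((hcl _ ih _ h2.1 h2.2).resolve_right (by simp))
    | cons p qs =>
      by_cases hpv : p ∈ visited
      · rw [show pvBfs grid (f + 1) visited (p :: qs) = pvBfs grid f visited qs by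
          simp [pvBfs, hpv]]
        refine IH visited qs hnd hvr (fun x hx => hqr x (by simp [hx])) hvs
          (fun x hx => hqs x (by simp [hx])) ?_ ?_ (by simp only [List.length_cons] at hfuel; omega)
        · rcases hst with h | h
          · exact Or.inl h
          · rcases List.mem_cons.mp h with rfl | h
            · exact Or.inl hpv
            · exact Or.inr h
        · intro x hx q hqR hadj
          rcases hcl x hx q hqR hadj with h | h
          · exact Or.inl h
          · rcases List.mem_cons.mp h with rfl | h
            · exact Or.inl hpv
            · exact Or.inr h
      · have hpR : p ∈ pvRoads grid := hqr p (by simp)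
        have hpReach : pvReach (pvRoads grid) s p := hqs p (by simp)
        set new := ([((-1 : Int), (0 : Int)), (1, 0), (0, -1), (0, 1)].filterMap (fun d =>
          if 0 ≤ p.1 + d.1 ∧ p.1 + d.1 < (grid.length : Int) ∧
             0 ≤ p.2 + d.2 ∧ p.2 + d.2 < ((grid.headD []).length : Int) ∧
             pvCell grid (p.1 + d.1) (p.2 + d.2) = 1 ∧ (p.1 + d.1, p.2 + d.2) ∉ visited
          then some (p.1 + d.1, p.2 + d.2) else none)) with hnew
        have hmemnew : ∀ q, q ∈ new ↔ pvAdj p q ∧ q ∈ pvRoads grid ∧ q ∉ visited := by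
          intro q; rw [hnew]; exact mem_pvNew grid hrect visited p q
        have hstep : pvBfs grid (f + 1) visited (p :: qs)
            = pvBfs grid f (visited ++ [p]) (qs ++ new) := by
          rw [show pvBfs grid (f+1) visited (p :: qs)
              = pvBfs grid f (PySem.Set.add visited p) (qs ++ new) by simp [pvBfs, hpv, hnew]]
          rw [PySem.Set.add_of_not_mem hpv]
        rw [hstep]
        -- fuel accounting
        have hlen_new : new.length ≤ 4 := by
          rw [hnew]; exact le_trans (List.length_filterMap_le _ _) (by simp)
        have hcount : ((pvRoads grid).filter (fun x => decide (x ∉ visited ++ [p]))).length + 1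
            = ((pvRoads grid).filter (fun x => decide (x ∉ visited))).length := by
          have h1 : (pvRoads grid).filter (fun x => decide (x ∉ visited ++ [p]))
              = ((pvRoads grid).filter (fun x => decide (x ∉ visited))).filter (fun x => x != p) := by
            rw [List.filter_filter]
            apply List.filter_congr
            intro x _
            by_cases h1 : x ∈ visited <;> by_cases h2 : x = p <;>
              simp [h1, h2, List.mem_append]
          have hnd2 : ((pvRoads grid).filter (fun x => decide (x ∉ visited))).Nodup :=
            (nodup_pvRoads grid).filter _
          have hpmem : p ∈ (pvRoads grid).filter (fun x => decide (x ∉ visited)) := by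
            simp [List.mem_filter, hpR, hpv]
          rw [h1, ← List.Nodup.erase_eq_filter hnd2 p, List.length_erase_of_mem hpmem]
          have : 1 ≤ ((pvRoads grid).filter (fun x => decide (x ∉ visited))).length :=
            List.length_pos_of_mem hpmem
          omega
        refine IH (visited ++ [p]) (qs ++ new) ?_ ?_ ?_ ?_ ?_ ?_ ?_ ?_
        · simp [List.nodup_append, hnd, hpv]
          rintro a b hab rfl
          exact hpv hab
        · intro x hx
          rcases List.mem_append.mp hx with h | h
          · exact hvr x h
          · rw [List.mem_singleton] at h; subst h; exact hpR
        · intro x hx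
          rcases List.mem_append.mp hx with h | h
          · exact hqr x (by simp [h])
          · exact ((hmemnew x).mp h).2.1
        · intro x hx
          rcases List.mem_append.mp hx with h | h
          · exact hvs x h
          · rw [List.mem_singleton] at h; subst h; exact hpReach
        · intro x hx
          rcases List.mem_append.mp hx with h | h
          · exact hqs x (by simp [h])
          · obtain ⟨hadj, hxR, _⟩ := (hmemnew x).mp h
            exact Relation.ReflTransGen.tail hpReach ⟨hxR, hadj⟩
        · rcases hst with h | h
          · exact Or.inl (List.mem_append.mpr (Or.inl h))
          · rcases List.mem_cons.mp h with rfl | h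
            · exact Or.inl (by simp)
            · exact Or.inr (List.mem_append.mpr (Or.inl h))
        · intro x hx q hqR hadj
          rcases List.mem_append.mp hx with h | h
          · rcases hcl x h q hqR hadj with h2 | h2
            · exact Or.inl (List.mem_append.mpr (Or.inl h2))
            · rcases List.mem_cons.mp h2 with rfl | h2
              · exact Or.inl (by simp)
              · exact Or.inr (List.mem_append.mpr (Or.inl h2))
          · rw [List.mem_singleton] at h; subst h
            by_cases hqv : q ∈ visited ++ [x]
            · exact Or.inl hqv
            · refine Or.inr (List.mem_append.mpr (Or.inr ?_))
              rw [hmemnew q]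
              simp only [List.mem_append, List.mem_singleton, not_or] at hqv
              exact ⟨hadj, hqR, hqv.1⟩
        · simp only [List.length_append] at hfuel ⊢
          simp only [List.length_cons] at hfuel
          omega

lemma mem_pvStep (R : List (Int × Int)) (C : PySem.Set (Int × Int)) (x : Int × Int) :
    x ∈ pvStep R C ↔ x ∈ C ∨ (x ∈ R ∧ ∃ q ∈ C, pvAdj q x) := by
  rw [pvStep, PySem.Set.mem_union]
  constructor
  · rintro (h | h)
    · exact Or.inl h
    · rw [List.mem_filter] at h
      refine Or.inr ⟨h.1, ?_⟩
      have hc := h.2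
      simp only [Bool.or_eq_true, decide_eq_true_eq] at hc
      rcases hc with ((h1 | h1) | h1) | h1
      · exact ⟨_, h1, by unfold pvAdj; simp [Prod.ext_iff]⟩
      · exact ⟨_, h1, by unfold pvAdj; simp [Prod.ext_iff]⟩
      · exact ⟨_, h1, by unfold pvAdj; simp [Prod.ext_iff]⟩
      · exact ⟨_, h1, by unfold pvAdj; simp [Prod.ext_iff]⟩
  · rintro (h | ⟨hxR, q, hqC, hadj⟩)
    · exact Or.inl h
    · refine Or.inr (List.mem_filter.mpr ⟨hxR, ?_⟩)
      simp only [Bool.or_eq_true, decide_eq_true_eq]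
      rcases hadj with h | h | h | h
      · left; left; right
        have : (x.1 + 1, x.2) = q := by
          obtain ⟨a, b⟩ := q; obtain ⟨c, d⟩ := x
          simp only [Prod.mk.injEq] at h ⊢
          omega
        rw [this]; exact hqC
      · left; left; left
        have : (x.1 - 1, x.2) = q := by
          obtain ⟨a, b⟩ := q; obtain ⟨c, d⟩ := x
          simp only [Prod.mk.injEq] at h ⊢
          omega
        rw [this]; exact hqC
      · right
        have : (x.1, x.2 + 1) = q := by
          obtain ⟨a, b⟩ := q; obtain ⟨c, d⟩ := x
          simp only [Prod.mk.injEq] at h ⊢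
          omega
        rw [this]; exact hqC
      · left; right
        have : (x.1, x.2 - 1) = q := by
          obtain ⟨a, b⟩ := q; obtain ⟨c, d⟩ := x
          simp only [Prod.mk.injEq] at h ⊢
          omega
        rw [this]; exact hqC

lemma pvStep_eq_append (R : List (Int × Int)) (C : PySem.Set (Int × Int)) :
    pvStep R C = C ++ (PySem.Set.ofList (R.filter (fun p =>
      decide ((p.1 - 1, p.2) ∈ C) || decide ((p.1 + 1, p.2) ∈ C) ||
      decide ((p.1, p.2 - 1) ∈ C) || decide ((p.1, p.2 + 1) ∈ C)))).filter
        (fun y => !(PySem.Set.contains C y)) :=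
  PySem.Set.update_eq_append_filter C _

lemma pvStep_subset (R : List (Int × Int)) (C : PySem.Set (Int × Int)) : C ⊆ pvStep R C := by
  rw [pvStep_eq_append]; exact List.subset_append_left _ _

lemma pvStep_fix_of_no_growth (R : List (Int × Int)) (C : PySem.Set (Int × Int))
    (h : ∀ x ∈ pvStep R C, x ∈ C) : pvStep R C = C := by
  rw [pvStep_eq_append] at h ⊢
  have : ∀ x, x ∉ (PySem.Set.ofList (R.filter (fun p =>
      decide ((p.1 - 1, p.2) ∈ C) || decide ((p.1 + 1, p.2) ∈ C) ||
      decide ((p.1, p.2 - 1) ∈ C) || decide ((p.1, p.2 + 1) ∈ C)))).filter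
        (fun y => !(PySem.Set.contains C y)) := by
    intro x hx
    have hxC := h x (List.mem_append.mpr (Or.inr hx))
    rw [List.mem_filter] at hx
    simp [PySem.Set.contains_iff] at hx
    exact hx.2 hxC
  rw [List.eq_nil_iff_forall_not_mem.mpr this, List.append_nil]

lemma pvStep_grow (R : List (Int × Int)) (C : PySem.Set (Int × Int))
    (h : pvStep R C ≠ C) : C.length + 1 ≤ (pvStep R C).length := by
  by_cases h2 : ∀ x ∈ pvStep R C, x ∈ C
  · exact absurd (pvStep_fix_of_no_growth R C h2) h
  · rw [pvStep_eq_append]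
    push_neg at h2
    obtain ⟨x, hx, _⟩ := h2
    rw [pvStep_eq_append] at hx
    rcases List.mem_append.mp hx with h3 | h3
    · simp_all
    · have : (PySem.Set.ofList (R.filter (fun p =>
        decide ((p.1 - 1, p.2) ∈ C) || decide ((p.1 + 1, p.2) ∈ C) ||
        decide ((p.1, p.2 - 1) ∈ C) || decide ((p.1, p.2 + 1) ∈ C)))).filter
          (fun y => !(PySem.Set.contains C y)) ≠ [] := by
        intro hnil
        rw [hnil] at h3; simp at h3
      have := List.length_pos_of_ne_nil this
      simp only [List.length_append]
      omega

lemma pvIter_inv (R : List (Int × Int)) (s : Int × Int) (hs : s ∈ R) : ∀ n : Nat,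
    ((pvStep R)^[n] [s]).Nodup ∧ (∀ x ∈ (pvStep R)^[n] [s], x ∈ R) ∧
    (∀ x ∈ (pvStep R)^[n] [s], pvReach R s x) ∧ s ∈ (pvStep R)^[n] [s] := by
  intro n
  induction n with
  | zero => exact ⟨by simp, by simpa using hs, by intro x hx; simp at hx; subst hx; exact Relation.ReflTransGen.refl, by simp⟩
  | succ m ih =>
    obtain ⟨hnd, hR, hreach, hsm⟩ := ih
    rw [Function.iterate_succ_apply']
    refine ⟨PySem.Set.nodup_union _ _ hnd, ?_, ?_, pvStep_subset R _ hsm⟩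
    · intro x hx
      rcases (mem_pvStep R _ x).mp hx with h | h
      · exact hR x h
      · exact h.1
    · intro x hx
      rcases (mem_pvStep R _ x).mp hx with h | h
      · exact hreach x h
      · obtain ⟨hxR, q, hqC, hadj⟩ := h
        exact Relation.ReflTransGen.tail (hreach q hqC) ⟨hxR, hadj⟩

lemma pvIter_fix (R : List (Int × Int)) (s : Int × Int) (hs : s ∈ R) :
    pvStep R ((pvStep R)^[R.length] [s]) = (pvStep R)^[R.length] [s] := by
  have key : ∀ n : Nat, (∃ m, m ≤ n ∧ pvStep R ((pvStep R)^[m] [s]) = (pvStep R)^[m] [s]) ∨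
      n + 1 ≤ ((pvStep R)^[n] [s]).length := by
    intro n
    induction n with
    | zero => right; simp
    | succ m ih =>
      rcases ih with ⟨k, hk, hfix⟩ | hlen
      · exact Or.inl ⟨k, by omega, hfix⟩
      · by_cases hfix : pvStep R ((pvStep R)^[m] [s]) = (pvStep R)^[m] [s]
        · exact Or.inl ⟨m, by omega, hfix⟩
        · right
          rw [Function.iterate_succ_apply']
          have := pvStep_grow R _ hfix
          omega
  rcases key R.length with ⟨m, hm, hfix⟩ | hlen
  · have hiter : ∀ j : Nat, (pvStep R)^[j] ((pvStep R)^[m] [s]) = (pvStep R)^[m] [s] :=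
      Function.iterate_fixed hfix
    have : (pvStep R)^[R.length] [s] = (pvStep R)^[m] [s] := by
      have : (pvStep R)^[(R.length - m) + m] [s] = (pvStep R)^[m] [s] := by
        rw [Function.iterate_add_apply]
        exact hiter _
      rwa [Nat.sub_add_cancel hm] at this
    rw [this, hfix]
  · exfalso
    obtain ⟨hnd, hsub, -, -⟩ := pvIter_inv R s hs R.length
    have := (List.subperm_of_subset hnd hsub).length_le
    omega

lemma pvSat_complete (R : List (Int × Int)) (s : Int × Int) (hs : s ∈ R) :
    ∀ x, pvReach R s x → x ∈ (pvStep R)^[R.length] [s] := by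
  intro x hx
  induction hx with
  | refl => exact (pvIter_inv R s hs R.length).2.2.2
  | tail h1 h2 ih =>
    rw [← pvIter_fix R s hs]
    exact (mem_pvStep R _ _).mpr (Or.inr ⟨h2.1, _, ih, h2.2⟩)

lemma foldl_const_iterate {α β : Type} (f : α → α) : ∀ (l : List β) (init : α),
    l.foldl (fun a _ => f a) init = f^[l.length] init := by
  intro l
  induction l with
  | nil => intro init; rfl
  | cons x xs ih =>
    intro init
    rw [List.foldl_cons, ih, List.length_cons, Function.iterate_succ_apply]

lemma pvRoads_eq_nil (grid : List (List Int)) (h : ∀ row ∈ grid, ∀ c ∈ row, c ≠ 1) :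
    pvRoads grid = [] := by
  rw [List.eq_nil_iff_forall_not_mem]
  intro p hp
  rw [mem_pvRoads] at hp
  obtain ⟨k, hk, j, hj, -, h1⟩ := hp
  exact h _ (List.getElem_mem _) _ (List.getElem_mem _) h1

lemma pvMain (grid : List (List Int))
    (hpre : (∀ row ∈ grid, row.length = (grid.headD []).length) ∨
      (∀ row ∈ grid, ∀ c ∈ row, c ≠ 1)) :
    all_roads_connected grid = all_roads_connected_alt grid := by
  by_cases hnil : pvRoads grid = []
  · simp [all_roads_connected, all_roads_connected_alt, hnil]
  · have hrect : ∀ row ∈ grid, row.length = (grid.headD []).length := by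
      rcases hpre with h | h
      · exact h
      · exact absurd (pvRoads_eq_nil grid h) hnil
    obtain ⟨s, rest, hR⟩ := List.exists_cons_of_ne_nil hnil
    have hs : s ∈ pvRoads grid := by rw [hR]; exact List.mem_cons_self
    simp only [all_roads_connected, all_roads_connected_alt, hR]
    rw [← hR]
    -- A side
    obtain ⟨hVnd, hVR, hViff⟩ := pvBfs_spec grid hrect s hs
      (1 + 4 * (pvRoads grid).length) PySem.Set.empty [s]
      (by simp [PySem.Set.empty]) (by simp [PySem.Set.empty])
      (by intro x hx; rw [List.mem_singleton] at hx; subst hx; exact hs)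
      (by simp [PySem.Set.empty])
      (by intro x hx; rw [List.mem_singleton] at hx; subst hx; exact Relation.ReflTransGen.refl)
      (Or.inr (by simp)) (by simp [PySem.Set.empty])
      (by simp [PySem.Set.empty])
    -- B side
    have hofl : PySem.Set.ofList [s] = [s] := PySem.Set.ofList_eq_self_of_nodup [s] (by simp)
    rw [foldl_const_iterate, PySem.List.length_pyRange_one, hofl]
    have hlen : ((((pvRoads grid).length : Int)) - 0).toNat = (pvRoads grid).length := by omega
    rw [hlen]
    have hCiff : ∀ x, x ∈ ((pvStep (pvRoads grid))^[(pvRoads grid).length] [s])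
        ↔ pvReach (pvRoads grid) s x := by
      intro x
      exact ⟨fun h => (pvIter_inv (pvRoads grid) s hs _).2.2.1 x h,
        fun h => pvSat_complete (pvRoads grid) s hs x h⟩
    rw [Bool.eq_iff_iff]
    constructor
    · intro h
      rw [beq_iff_eq] at h
      have hperm : List.Perm (pvBfs grid (1 + 4 * (pvRoads grid).length) PySem.Set.empty [s]) (pvRoads grid) :=
        (List.subperm_of_subset hVnd hVR).perm_of_length_le (by omega)
      rw [List.all_eq_true]
      intro p hp
      rw [PySem.Set.contains_iff, hCiff]
      exact (hViff p).mp (hperm.mem_iff.mpr hp)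
    · intro h
      rw [List.all_eq_true] at h
      rw [beq_iff_eq]
      have hsub : pvRoads grid ⊆ pvBfs grid (1 + 4 * (pvRoads grid).length) PySem.Set.empty [s] := by
        intro p hp
        have := h p hp
        rw [PySem.Set.contains_iff, hCiff] at this
        exact (hViff p).mpr this
      exact ((List.subperm_of_subset hVnd hVR).antisymm
        (List.subperm_of_subset (nodup_pvRoads grid) hsub)).length_eq

-- ===== VERDICT (by name: the statement is the Claim_ definition above) =====
theorem all_roads_connected_spec : Claim_equal_all_roads_connected := by
  intro grid _ hpre
  unfold Pre_all_roads_connected at hpre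
  unfold Spec_all_roads_connected
  exact pvMain grid hpre
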